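-- pv_equiv track=rewrite | github.com/DanielBBrasileiro/manim | core/compiler/intent_parser.py | detect_score
-- ===== SOURCE A (Python) =====
-- from typing import List
--
-- def detect_score(tokens: List[str], concept_map: dict, default: str) -> str:
--     scores = {key: 0 for key in concept_map.keys()}
--
--     # 1-gram
--     for word in tokens:
--         for key, keywords in concept_map.items():
--             if word in keywords:
--                 scores[key] += 1
--
--     # 2-grams (simplificado para "chaos to order" etc)
--     text_joined = " ".join(tokens)
--     for key, keywords in concept_map.items():
--         for kw in keywords:
--             if " " in kw and kw in text_joined:
--                 scores[key] += 2  # Bigrams têm mais peso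
--
--     # Vencedor
--     best_match = max(scores.items(), key=lambda x: x[1])
--     if best_match[1] > 0:
--         return best_match[0]
--
--     return default
-- ===== SOURCE B (Python) =====
-- from typing import List
--
-- def detect_score(tokens: List[str], concept_map: dict, default: str) -> str:
--     # Token multiset counted once; each concept is then scored key-major in a
--     # single pass, keeping a running best instead of a scores dict + max().
--     counts = {}
--     for t in tokens:
--         counts[t] = counts.get(t, 0) + 1
--
--     text_joined = " ".join(tokens)
--     best_key, best_score = default, 0
--     for key, keywords in concept_map.items():
--         score = sum(counts.get(kw, 0) for kw in set(keywords))
--         score += 2 * sum(1 for kw in keywords if " " in kw and kw in text_joined)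
--         if score > best_score:
--             best_key, best_score = key, score
--     return best_key
-- ===== Notes on version B (the rewrite author's own statement) =====
-- stated objective: faster
-- what changed: B counts the token multiset once into a plain dict and then scores each concept key-major in a single pass (sum of counts over the distinct keywords plus the bigram bonus), keeping a running best seeded with (default, 0), instead of A's token-major per-token scan over every concept's keyword list, a scores dict, and a final max()+threshold; Pre_ excludes the empty concept map (A's max() raises ValueError) and association lists with duplicate keys, which do not denote a Python dict.
import Mathlib
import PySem

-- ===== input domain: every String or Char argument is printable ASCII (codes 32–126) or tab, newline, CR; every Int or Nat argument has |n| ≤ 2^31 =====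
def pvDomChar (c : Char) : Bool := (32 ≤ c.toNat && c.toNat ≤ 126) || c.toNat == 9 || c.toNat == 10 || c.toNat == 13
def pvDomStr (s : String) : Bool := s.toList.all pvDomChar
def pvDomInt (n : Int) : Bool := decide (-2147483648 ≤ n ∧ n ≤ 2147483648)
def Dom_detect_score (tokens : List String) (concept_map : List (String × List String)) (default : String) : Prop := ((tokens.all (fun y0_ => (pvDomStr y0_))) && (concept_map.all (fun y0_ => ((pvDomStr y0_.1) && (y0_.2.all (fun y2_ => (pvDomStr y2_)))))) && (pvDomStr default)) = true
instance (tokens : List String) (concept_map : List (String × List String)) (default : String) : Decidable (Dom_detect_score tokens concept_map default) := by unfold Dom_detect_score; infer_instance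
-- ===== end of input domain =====

-- B counts the token multiset once and scores each concept key-major in a single
-- running-best pass, instead of A's token-major scans, scores dict and max() (objective: faster).


-- ===== PORT A =====
def detect_score (tokens : List String) (concept_map : List (String × List String)) (default : String) : String :=
  let scores0 : PySem.Dict String Int :=
    concept_map.foldl (fun d kv => d.insert kv.1 0) PySem.Dict.empty
  let scores1 :=
    tokens.foldl (fun sc word =>
      concept_map.foldl (fun sc kv =>
        if kv.2.contains word then sc.modify kv.1 0 (· + 1) else sc) sc) scores0
  let text_joined := PySem.Str.join " " tokens
  let scores2 :=
    concept_map.foldl (fun sc kv =>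
      kv.2.foldl (fun sc kw =>
        if PySem.Str.isIn " " kw && PySem.Str.isIn kw text_joined
        then sc.modify kv.1 0 (· + 2) else sc) sc) scores1
  match PySem.List.max? scores2.items (fun p => p.2) with
  | some best => if best.2 > 0 then best.1 else default
  | none => default

-- ===== PORT B =====
def detect_score_alt (tokens : List String) (concept_map : List (String × List String)) (default : String) : String :=
  let counts : PySem.Dict String Int :=
    tokens.foldl (fun d t => d.insert t (d.getD t 0 + 1)) PySem.Dict.empty
  let text_joined := PySem.Str.join " " tokens
  let best := concept_map.foldl (fun b kv =>
    let score :=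
      ((PySem.Set.ofList kv.2).map (fun kw => counts.getD kw 0)).sum
        + 2 * kv.2.foldl (fun n kw =>
            if PySem.Str.isIn " " kw && PySem.Str.isIn kw text_joined then n + 1 else n) (0 : Int)
    if score > b.2 then (kv.1, score) else b) ((default, 0) : String × Int)
  best.1

-- ===== PRECONDITION & SPEC =====
-- Pre_ excludes the empty concept map, on which A's max() raises ValueError, and
-- association lists with duplicate keys, which do not denote a unique Python dict
-- (a Python dict collapses duplicates before A ever sees them).
def Pre_detect_score (tokens : List String) (concept_map : List (String × List String)) (default : String) : Prop :=
  concept_map ≠ [] ∧ (concept_map.map Prod.fst).Nodup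
instance (tokens : List String) (concept_map : List (String × List String)) (default : String) : Decidable (Pre_detect_score tokens concept_map default) := by unfold Pre_detect_score; infer_instance
def pvWitness_detect_score : List String × (List (String × List String)) × String :=
  (["chaos"], [("order", ["calm"]), ("chaos", ["chaos", "chaos to order"])], "none")

def Spec_detect_score (tokens : List String) (concept_map : List (String × List String)) (default : String) (out : String) : Prop := out = detect_score_alt tokens concept_map default
instance (tokens : List String) (concept_map : List (String × List String)) (default : String) (out : String) : Decidable (Spec_detect_score tokens concept_map default out) := by unfold Spec_detect_score; infer_instance

-- ===== CLAIM (what is proved, stated in full; the proofs are below) =====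
def Claim_equal_detect_score : Prop := ∀ (tokens : List String) (concept_map : List (String × List String)) (default : String), Dom_detect_score tokens concept_map default → Pre_detect_score tokens concept_map default → Spec_detect_score tokens concept_map default (detect_score tokens concept_map default)

-- ===== LEMMAS AND PROOFS =====

-- the score A assigns to one concept entry, as a closed expression
def pvScore (tokens : List String) (txt : String) (kv : String × List String) : Int :=
  (tokens.countP (fun t => kv.2.contains t) : Int)
    + 2 * (kv.2.countP (fun kw => PySem.Str.isIn " " kw && PySem.Str.isIn kw txt) : Int)

theorem pvScore_nonneg (tokens : List String) (txt : String) (kv : String × List String) :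
    0 ≤ pvScore tokens txt kv := by
  unfold pvScore; positivity

-- ---- A side: characterize the scores dict ----

-- keys of a dict are preserved by modifying a key it contains
theorem pv_keys_modify_mem (d : PySem.Dict String Int) (k : String) (f : Int → Int)
    (h : k ∈ d.keys) : (d.modify k 0 f).keys = d.keys := by
  rw [PySem.Dict.keys_modify, PySem.Dict.keys_insert_of_contains]
  exact (PySem.Dict.contains_iff_mem_keys d k).2 h

-- a fold of conditional modifies at keys drawn from cm preserves the key list
theorem pv_keys_pass (cm : List (String × List String)) (c : (String × List String) → Bool)
    (n : Int) (sc : PySem.Dict String Int)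
    (h : ∀ kv ∈ cm, kv.1 ∈ sc.keys) :
    (cm.foldl (fun sc kv => if c kv then sc.modify kv.1 0 (· + n) else sc) sc).keys = sc.keys := by
  induction cm generalizing sc with
  | nil => rfl
  | cons kv t ih =>
    simp only [List.foldl_cons]
    by_cases hc : c kv
    · rw [if_pos hc]
      have hk := pv_keys_modify_mem sc kv.1 (· + n) (h kv List.mem_cons_self)
      rw [ih _ (fun q hq => hk ▸ h q (List.mem_cons_of_mem _ hq)), hk]
    · rw [if_neg hc]
      exact ih sc (fun q hq => h q (List.mem_cons_of_mem _ hq))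

-- the whole 1-gram stage preserves the key list
theorem pv_keys_onegram (tokens : List String) (cm : List (String × List String))
    (sc : PySem.Dict String Int) (h : ∀ kv ∈ cm, kv.1 ∈ sc.keys) :
    (tokens.foldl (fun sc word =>
        cm.foldl (fun sc kv =>
          if kv.2.contains word then sc.modify kv.1 0 (· + 1) else sc) sc) sc).keys
      = sc.keys := by
  induction tokens generalizing sc with
  | nil => rfl
  | cons w ws ih =>
    simp only [List.foldl_cons]
    have hp := pv_keys_pass cm (fun kv => kv.2.contains w) 1 sc h
    rw [ih _ (fun kv hkv => hp ▸ h kv hkv), hp]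

-- the bigram inner loop preserves the key list
theorem pv_keys_bigram_inner (kws : List String) (q txt : String)
    (sc : PySem.Dict String Int) (h : q ∈ sc.keys) :
    (kws.foldl (fun sc kw =>
        if PySem.Str.isIn " " kw && PySem.Str.isIn kw txt
        then sc.modify q 0 (· + 2) else sc) sc).keys = sc.keys := by
  induction kws generalizing sc with
  | nil => rfl
  | cons kw t ih =>
    simp only [List.foldl_cons]
    by_cases hc : (PySem.Str.isIn " " kw && PySem.Str.isIn kw txt : Bool)
    · rw [if_pos hc]
      have hk := pv_keys_modify_mem sc q (· + 2) h
      rw [ih _ (hk ▸ h), hk]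
    · rw [if_neg hc, ih _ h]

-- the whole bigram stage preserves the key list
theorem pv_keys_bigram (cm : List (String × List String)) (txt : String)
    (sc : PySem.Dict String Int) (h : ∀ kv ∈ cm, kv.1 ∈ sc.keys) :
    (cm.foldl (fun sc kv =>
        kv.2.foldl (fun sc kw =>
          if PySem.Str.isIn " " kw && PySem.Str.isIn kw txt
          then sc.modify kv.1 0 (· + 2) else sc) sc) sc).keys = sc.keys := by
  induction cm generalizing sc with
  | nil => rfl
  | cons kv t ih =>
    simp only [List.foldl_cons]
    have hk := pv_keys_bigram_inner kv.2 kv.1 txt sc (h kv List.mem_cons_self)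
    rw [ih _ (fun q hq => hk ▸ h q (List.mem_cons_of_mem _ hq)), hk]

-- if k is none of cm's keys, a pass of conditional modifies leaves getD k unchanged
theorem pv_getD_pass_notmem (cm : List (String × List String))
    (c : (String × List String) → Bool) (n : Int) (sc : PySem.Dict String Int)
    (k : String) (hk : k ∉ cm.map Prod.fst) :
    (cm.foldl (fun sc kv => if c kv then sc.modify kv.1 0 (· + n) else sc) sc).getD k 0
      = sc.getD k 0 := by
  induction cm generalizing sc with
  | nil => rfl
  | cons kv t ih =>
    simp only [List.map_cons, List.mem_cons, not_or] at hk
    simp only [List.foldl_cons]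
    by_cases hc : c kv
    · rw [if_pos hc, ih _ hk.2, PySem.Dict.getD_modify_of_ne sc 0 _ hk.1]
    · rw [if_neg hc, ih _ hk.2]

-- one pass over cm with nodup keys adds the indicator at each key
theorem pv_getD_pass (cm : List (String × List String))
    (c : (String × List String) → Bool) (n : Int) (sc : PySem.Dict String Int)
    (k : String) (kws : List String)
    (hnd : (cm.map Prod.fst).Nodup) (hmem : (k, kws) ∈ cm) :
    (cm.foldl (fun sc kv => if c kv then sc.modify kv.1 0 (· + n) else sc) sc).getD k 0
      = sc.getD k 0 + (if c (k, kws) then n else 0) := by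
  induction cm generalizing sc with
  | nil => cases hmem
  | cons kv t ih =>
    simp only [List.map_cons, List.nodup_cons] at hnd
    rcases List.mem_cons.1 hmem with heq | htl
    · have hk : k ∉ t.map Prod.fst := by
        rw [← heq] at hnd; exact hnd.1 ∘ (by simpa using ·)
      simp only [List.foldl_cons]
      rw [← heq]
      by_cases hc : c (k, kws)
      · rw [if_pos hc, pv_getD_pass_notmem t c n _ k hk,
          PySem.Dict.getD_modify_self, if_pos hc]
      · rw [if_neg hc, pv_getD_pass_notmem t c n _ k hk, if_neg hc]
        ring
    · have hne : k ≠ kv.1 := by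
        intro h; exact hnd.1 (h ▸ List.mem_map_of_mem (f := Prod.fst) htl)
      simp only [List.foldl_cons]
      by_cases hc : c kv
      · rw [if_pos hc, ih _ hnd.2 htl, PySem.Dict.getD_modify_of_ne sc 0 _ hne]
      · rw [if_neg hc, ih _ hnd.2 htl]

-- the 1-gram stage: each token adds its membership indicator
theorem pv_getD_onegram (tokens : List String) (cm : List (String × List String))
    (sc : PySem.Dict String Int) (k : String) (kws : List String)
    (hnd : (cm.map Prod.fst).Nodup) (hmem : (k, kws) ∈ cm) :
    (tokens.foldl (fun sc word =>
        cm.foldl (fun sc kv =>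
          if kv.2.contains word then sc.modify kv.1 0 (· + 1) else sc) sc) sc).getD k 0
      = sc.getD k 0 + (tokens.countP (fun t => kws.contains t) : Int) := by
  induction tokens generalizing sc with
  | nil => simp
  | cons w ws ih =>
    simp only [List.foldl_cons]
    rw [ih _, pv_getD_pass cm (fun kv => kv.2.contains w) 1 sc k kws hnd hmem,
      List.countP_cons]
    by_cases h : kws.contains w = true
    · rw [if_pos h, if_pos h]; push_cast; ring
    · rw [if_neg h, if_neg h]; push_cast; ring

-- the bigram inner loop at its own key
theorem pv_getD_bigram_inner_self (kws : List String) (q : String) (txt : String)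
    (sc : PySem.Dict String Int) :
    (kws.foldl (fun sc kw =>
        if PySem.Str.isIn " " kw && PySem.Str.isIn kw txt
        then sc.modify q 0 (· + 2) else sc) sc).getD q 0
      = sc.getD q 0
        + 2 * (kws.countP (fun kw => PySem.Str.isIn " " kw && PySem.Str.isIn kw txt) : Int) := by
  induction kws generalizing sc with
  | nil => simp
  | cons kw t ih =>
    simp only [List.foldl_cons, List.countP_cons]
    by_cases h : (PySem.Str.isIn " " kw && PySem.Str.isIn kw txt : Bool)
    · rw [if_pos h, ih, PySem.Dict.getD_modify_self, if_pos h]; push_cast; ring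
    · rw [if_neg h, ih, if_neg h]; push_cast; ring

-- … and at any other key
theorem pv_getD_bigram_inner_ne (kws : List String) (q : String) (txt : String)
    (sc : PySem.Dict String Int) (k : String) (hne : k ≠ q) :
    (kws.foldl (fun sc kw =>
        if PySem.Str.isIn " " kw && PySem.Str.isIn kw txt
        then sc.modify q 0 (· + 2) else sc) sc).getD k 0 = sc.getD k 0 := by
  induction kws generalizing sc with
  | nil => rfl
  | cons kw t ih =>
    simp only [List.foldl_cons]
    by_cases h : (PySem.Str.isIn " " kw && PySem.Str.isIn kw txt : Bool)
    · rw [if_pos h, ih, PySem.Dict.getD_modify_of_ne sc 0 _ hne]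
    · rw [if_neg h, ih]

-- if k is none of cm's keys, the bigram stage leaves getD k unchanged
theorem pv_getD_bigram_notmem : ∀ (cm : List (String × List String)) (txt : String)
    (sc : PySem.Dict String Int) (k : String), k ∉ cm.map Prod.fst →
    (cm.foldl (fun sc kv =>
        kv.2.foldl (fun sc kw =>
          if PySem.Str.isIn " " kw && PySem.Str.isIn kw txt
          then sc.modify kv.1 0 (· + 2) else sc) sc) sc).getD k 0 = sc.getD k 0
  | [], _, _, _, _ => rfl
  | kv :: t, txt, sc, k, hk => by
      simp only [List.map_cons, List.mem_cons, not_or] at hk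
      simp only [List.foldl_cons]
      rw [pv_getD_bigram_notmem t txt _ k hk.2,
        pv_getD_bigram_inner_ne kv.2 kv.1 txt sc k hk.1]

-- the bigram stage over the whole map
theorem pv_getD_bigram (cm : List (String × List String)) (txt : String)
    (sc : PySem.Dict String Int) (k : String) (kws : List String)
    (hnd : (cm.map Prod.fst).Nodup) (hmem : (k, kws) ∈ cm) :
    (cm.foldl (fun sc kv =>
        kv.2.foldl (fun sc kw =>
          if PySem.Str.isIn " " kw && PySem.Str.isIn kw txt
          then sc.modify kv.1 0 (· + 2) else sc) sc) sc).getD k 0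
      = sc.getD k 0
        + 2 * (kws.countP (fun kw => PySem.Str.isIn " " kw && PySem.Str.isIn kw txt) : Int) := by
  induction cm generalizing sc with
  | nil => cases hmem
  | cons kv t ih =>
    simp only [List.map_cons, List.nodup_cons] at hnd
    rcases List.mem_cons.1 hmem with heq | htl
    · have hk : k ∉ t.map Prod.fst := by
        rw [← heq] at hnd; exact hnd.1 ∘ (by simpa using ·)
      simp only [List.foldl_cons]
      rw [pv_getD_bigram_notmem t txt _ k hk, ← heq, pv_getD_bigram_inner_self]
    · have hne : k ≠ kv.1 := by
        intro h; exact hnd.1 (h ▸ List.mem_map_of_mem (f := Prod.fst) htl)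
      simp only [List.foldl_cons]
      rw [ih _ hnd.2 htl, pv_getD_bigram_inner_ne kv.2 kv.1 txt sc k hne]

-- initial dict: items are exactly the keys paired with 0
theorem pv_scores0_items (cm : List (String × List String))
    (hnd : (cm.map Prod.fst).Nodup) :
    (cm.foldl (fun d kv => d.insert kv.1 0) (PySem.Dict.empty : PySem.Dict String Int)).items
      = cm.map (fun kv => (kv.1, (0 : Int))) := by
  have := PySem.Dict.items_foldl_insert_fresh cm Prod.fst (fun _ => (0 : Int))
    PySem.Dict.empty (fun a _ => PySem.Dict.contains_empty a.1) hnd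
  simpa using this

-- full characterization of A's final items list
theorem pv_scores2_items (tokens : List String) (cm : List (String × List String))
    (txt : String) (hnd : (cm.map Prod.fst).Nodup) :
    (cm.foldl (fun sc kv =>
        kv.2.foldl (fun sc kw =>
          if PySem.Str.isIn " " kw && PySem.Str.isIn kw txt
          then sc.modify kv.1 0 (· + 2) else sc) sc)
      (tokens.foldl (fun sc word =>
        cm.foldl (fun sc kv =>
          if kv.2.contains word then sc.modify kv.1 0 (· + 1) else sc) sc)
        (cm.foldl (fun d kv => d.insert kv.1 0) (PySem.Dict.empty : PySem.Dict String Int)))).items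
      = cm.map (fun kv => (kv.1, pvScore tokens txt kv)) := by
  set s0 := cm.foldl (fun d kv => d.insert kv.1 0) (PySem.Dict.empty : PySem.Dict String Int) with hs0
  set s1 := tokens.foldl (fun sc word =>
      cm.foldl (fun sc kv =>
        if kv.2.contains word then sc.modify kv.1 0 (· + 1) else sc) sc) s0 with hs1
  set s2 := cm.foldl (fun sc kv =>
      kv.2.foldl (fun sc kw =>
        if PySem.Str.isIn " " kw && PySem.Str.isIn kw txt
        then sc.modify kv.1 0 (· + 2) else sc) sc) s1 with hs2
  have h0items : s0.items = cm.map (fun kv => (kv.1, (0 : Int))) := pv_scores0_items cm hnd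
  have h0keys : s0.keys = cm.map Prod.fst := by
    simp only [PySem.Dict.keys, h0items, List.map_map]
    rfl
  have h1keys : s1.keys = cm.map Prod.fst := by
    rw [hs1, pv_keys_onegram tokens cm s0
      (fun kv hkv => h0keys ▸ List.mem_map_of_mem (f := Prod.fst) hkv), h0keys]
  have h2keys : s2.keys = cm.map Prod.fst := by
    rw [hs2, pv_keys_bigram cm txt s1
      (fun kv hkv => h1keys ▸ List.mem_map_of_mem (f := Prod.fst) hkv), h1keys]
  have h2nd : s2.keys.Nodup := h2keys ▸ hnd
  rw [PySem.Dict.items_eq_map_keys s2 h2nd 0, h2keys, List.map_map]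
  refine List.map_congr_left (fun kv hkv => ?_)
  have hmem : (kv.1, kv.2) ∈ cm := by simpa using hkv
  have h0 : s0.getD kv.1 0 = 0 :=
    PySem.Dict.getD_of_mem_items s0
      (by rw [h0items]; exact List.mem_map_of_mem hkv) (h0keys ▸ hnd) 0
  have h1 : s1.getD kv.1 0
      = (tokens.countP (fun t => kv.2.contains t) : Int) := by
    rw [hs1, pv_getD_onegram tokens cm s0 kv.1 kv.2 hnd hmem, h0, zero_add]
  have h2 : s2.getD kv.1 0 = pvScore tokens txt kv := by
    rw [hs2, pv_getD_bigram cm txt s1 kv.1 kv.2 hnd hmem, h1]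
    rfl
  simp only [Function.comp_apply, h2]

-- ---- winner selection: Python's max()+threshold is the running-max scan ----

theorem pv_max_some (t : List (String × Int)) (m : String × Int) :
    PySem.List.max? (m :: t) (fun p : String × Int => p.2)
      = some (t.foldl (fun b kv => if kv.2 > b.2 then kv else b) m) := by
  induction t generalizing m with
  | nil => rfl
  | cons x t ih =>
    have hx := ih x
    have hm := ih m
    unfold PySem.List.max? at hx hm ⊢
    simp only [List.foldl_cons] at hx hm ⊢
    show List.foldl _ (if m.2 < x.2 then some x else some m) t
      = some (List.foldl _ (if x.2 > m.2 then x else m) t)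
    by_cases h : m.2 < x.2
    · rw [if_pos h, if_pos (show x.2 > m.2 from h)]
      exact hx
    · rw [if_neg h, if_neg (show ¬ x.2 > m.2 from h)]
      exact hm

theorem pv_scan_mono (t : List (String × Int)) (b : String × Int) :
    b.2 ≤ (t.foldl (fun b kv => if kv.2 > b.2 then kv else b) b).2 := by
  induction t generalizing b with
  | nil => simp
  | cons x t ih =>
    simp only [List.foldl_cons]
    by_cases h : x.2 > b.2
    · simp only [h, if_pos]
      exact le_trans (le_of_lt h) (ih x)
    · simp only [h, if_neg, not_false_iff]
      exact ih b

theorem pv_scan_either (t : List (String × Int)) (b c : String × Int) (h : b.2 = c.2) :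
    (t.foldl (fun b kv => if kv.2 > b.2 then kv else b) b = b ∧
     t.foldl (fun b kv => if kv.2 > b.2 then kv else b) c = c) ∨
    (t.foldl (fun b kv => if kv.2 > b.2 then kv else b) b
       = t.foldl (fun b kv => if kv.2 > b.2 then kv else b) c ∧
     b.2 < (t.foldl (fun b kv => if kv.2 > b.2 then kv else b) b).2) := by
  induction t generalizing b c with
  | nil => exact Or.inl ⟨rfl, rfl⟩
  | cons x t ih =>
    by_cases hx : x.2 > b.2
    · right
      simp only [List.foldl_cons, if_pos hx, if_pos (h ▸ hx)]
      refine ⟨by trivial, lt_of_lt_of_le hx (pv_scan_mono t x)⟩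
    · have hx' : ¬ x.2 > c.2 := h ▸ hx
      simp only [List.foldl_cons, if_neg hx, if_neg hx']
      exact ih b c h

theorem pv_winner (l : List (String × Int)) (default : String)
    (hne : l ≠ []) (hnn : ∀ p ∈ l, 0 ≤ p.2) :
    (match PySem.List.max? l (fun p => p.2) with
     | some best => if best.2 > 0 then best.1 else default
     | none => default)
      = (l.foldl (fun b kv => if kv.2 > b.2 then kv else b) ((default, 0) : String × Int)).1 := by
  cases l with
  | nil => exact absurd rfl hne
  | cons p t =>
    have hp0 : 0 ≤ p.2 := hnn p List.mem_cons_self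
    have hmax : PySem.List.max? (p :: t) (fun p : String × Int => p.2)
        = some (t.foldl (fun b kv => if kv.2 > b.2 then kv else b) p) := pv_max_some t p
    rw [hmax]
    simp only [List.foldl_cons]
    by_cases hp : ((default, 0) : String × Int).2 < p.2
    · rw [if_pos (show p.2 > ((default, 0) : String × Int).2 from hp)]
      have hm := pv_scan_mono t p
      exact (if_pos (show (t.foldl (fun b kv => if kv.2 > b.2 then kv else b) p).2 > 0 from
        lt_of_lt_of_le hp hm)).symm ▸ rfl
    · have hpz : p.2 = 0 := le_antisymm (not_lt.1 hp) hp0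
      rw [if_neg (show ¬ p.2 > ((default, 0) : String × Int).2 from hp)]
      rcases pv_scan_either t p ((default, 0) : String × Int) (by simpa using hpz)
        with ⟨ha, hb⟩ | ⟨heq, hlt⟩
      · rw [ha, hb, if_neg (by rw [hpz]; exact lt_irrefl 0)]
      · rw [heq, if_pos (by rw [← heq]; exact hpz ▸ hlt)]

-- ---- B side: the counter sum is the membership count ----

-- sum of equality indicators over a duplicate-free list is a membership test
theorem pv_sum_ind (l : List String) (a : String) (hnd : l.Nodup) :
    (l.map (fun kw => if (a == kw) = true then (1 : Int) else 0)).sum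
      = if l.contains a then (1 : Int) else 0 := by
  induction l with
  | nil => simp
  | cons x t ih =>
    rcases List.nodup_cons.1 hnd with ⟨hx, ht⟩
    simp only [List.map_cons, List.sum_cons, ih ht]
    by_cases h : a = x
    · subst h
      simp [hx]
    · simp [h]

theorem pv_sum_counts (l : List String) (tokens : List String) (hnd : l.Nodup) :
    (l.map (fun kw => (tokens.count kw : Int))).sum
      = (tokens.countP (fun t => l.contains t) : Int) := by
  induction tokens with
  | nil => simp
  | cons a ts ih =>
    have hmap : l.map (fun kw => (((a :: ts).count kw : Nat) : Int))
        = l.map (fun kw => ((ts.count kw : Nat) : Int) + if (a == kw) = true then (1 : Int) else 0) := by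
      refine List.map_congr_left (fun kw _ => ?_)
      rw [List.count_cons]
      by_cases h : (a == kw) = true <;> simp [h]
    rw [hmap, PySem.List.sum_map_add_int, ih, pv_sum_ind l a hnd, List.countP_cons]
    by_cases h : l.contains a = true
    · rw [if_pos h, if_pos h]; push_cast; ring
    · rw [if_neg h, if_neg h]; push_cast; ring

-- B's per-entry score expression equals pvScore
theorem pv_score_alt_eq (tokens : List String) (txt : String) (kv : String × List String) :
    ((PySem.Set.ofList kv.2).map (fun kw =>
        (tokens.foldl (fun d t => d.insert t (d.getD t 0 + 1)) PySem.Dict.empty).getD kw 0)).sum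
      + 2 * kv.2.foldl (fun n kw =>
          if PySem.Str.isIn " " kw && PySem.Str.isIn kw txt then n + 1 else n) (0 : Int)
      = pvScore tokens txt kv := by
  have hc : ∀ kw, (tokens.foldl (fun d t => d.insert t (d.getD t 0 + 1))
      PySem.Dict.empty).getD kw 0 = (tokens.count kw : Int) := by
    intro kw
    rw [PySem.Dict.getD_foldl_insert_add_one]
    simp [PySem.Dict.getD_empty]
  have h1 : ((PySem.Set.ofList kv.2).map (fun kw =>
      (tokens.foldl (fun d t => d.insert t (d.getD t 0 + 1)) PySem.Dict.empty).getD kw 0)).sum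
      = (tokens.countP (fun t => kv.2.contains t) : Int) := by
    rw [List.map_congr_left (fun kw _ => hc kw),
      pv_sum_counts _ tokens (by rw [← PySem.List.dedup_eq_ofList]; exact PySem.List.nodup_dedup kv.2)]
    congr 1
    refine List.countP_congr (fun t _ => ?_)
    rw [← PySem.List.dedup_eq_ofList]
    simp
  rw [h1, PySem.List.foldl_if_add_one]
  unfold pvScore
  ring

-- ===== VERDICT (by name: the statement is the Claim_ definition above) =====
theorem detect_score_spec : Claim_equal_detect_score := by
  intro tokens cm default _ hpre
  obtain ⟨hne, hnd⟩ := hpre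
  show detect_score tokens cm default = detect_score_alt tokens cm default
  simp only [detect_score, detect_score_alt]
  rw [pv_scores2_items tokens cm (PySem.Str.join " " tokens) hnd]
  rw [pv_winner _ default
    (by simpa using hne)
    (by rintro p hp; rcases List.mem_map.1 hp with ⟨kv, _, rfl⟩; exact pvScore_nonneg _ _ _)]
  rw [List.foldl_map]
  simp only [pv_score_alt_eq]
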